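-- pv_equiv track=rewrite | github.com/tunguyen112/-n-python | card_characters.py | update_character_order
-- ===== SOURCE A (Python) =====
-- def update_character_order(character_order):
--     """Thực hiện việc thay đổi thứ tự nhân vật của người chơi
--
--     Parameters:
--         character_order (dictionary): danh sách nhân vật người chơi đã chọn và thứ tự của nhân vật
--
--     Returns:
--         character_order (dictionary): danh sách nhân vật người chơi đã chọn và thứ tự của nhân vật (đã thay đổi)
--     """
--     # Lấy danh sách các giá trị từ từ điển hiện tại
--     current_values = list(character_order.values())
--     l1 = [1,2,3]
--     l2 = [1,3,2]
--     l3 = [2,1,3]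
--     l4 = [2,3,1]
--     l5 = [3,1,2]
--     l6 = [3,2,1]
--     l7 = [1,2]
--     l8 = [2,1]
--     i = 0
--     if current_values == l1:
--     # Cập nhật lại giá trị trong từ điển
--         for key in character_order:
--             character_order[key] = l2[i] # gán giá trị mới cho key
--             i += 1
--     # So sánh danh sách giá trị hiện tại với danh sách giá trị mong muốn
--     elif current_values == l2:
--         # Cập nhật lại giá trị trong từ điển
--         for key in character_order:
--             character_order[key] = l3[i] # gán giá trị mới cho key
--             i += 1
--     # So sánh danh sách giá trị hiện tại với danh sách giá trị mong muốn
--     elif current_values == l3: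
--         # Cập nhật lại giá trị trong từ điển
--         for key in character_order:
--             character_order[key] = l4[i] # gán giá trị mới cho key
--             i += 1
--     # So sánh danh sách giá trị hiện tại với danh sách giá trị mong muốn
--     elif current_values == l4:
--         # Cập nhật lại giá trị trong từ điển
--         for key in character_order:
--             character_order[key] = l5[i] # gán giá trị mới cho key
--             i += 1
--     # So sánh danh sách giá trị hiện tại với danh sách giá trị mong muốn
--     elif current_values == l5:
--         # Cập nhật lại giá trị trong từ điển
--         for key in character_order:
--             character_order[key] = l6[i] # gán giá trị mới cho key
--             i += 1
--     # So sánh danh sách giá trị hiện tại với danh sách giá trị mong muốn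
--     elif current_values == l6:
--         # Cập nhật lại giá trị trong từ điển
--         for key in character_order:
--             character_order[key] = l1[i] # gán giá trị mới cho key
--             i += 1
--      # So sánh danh sách giá trị hiện tại với danh sách giá trị mong muốn
--     if current_values == l7:
--         # Cập nhật lại giá trị trong từ điển
--         for key in character_order:
--             character_order[key] = l8[i] # gán giá trị mới cho key
--             i += 1
--     # So sánh danh sách giá trị hiện tại với danh sách giá trị mong muốn
--     elif current_values == l8:
--         # Cập nhật lại giá trị trong từ điển
--         for key in character_order:
--             character_order[key] = l7[i] # gán giá trị mới cho key
--             i += 1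
--     return character_order
-- ===== SOURCE B (Python) =====
-- def _fact(n):
--     return 1 if n == 0 else n * _fact(n - 1)
--
--
-- def update_character_order(character_order):
--     vals = list(character_order.values())
--     n = len(vals)
--     if n in (2, 3) and sorted(vals) == list(range(1, n + 1)):
--         # lexicographic rank of vals via its Lehmer code (factorial number system)
--         rank = 0
--         rest = vals
--         while rest:
--             v, rest = rest[0], rest[1:]
--             rank = rank * (len(rest) + 1) + sum(1 for x in rest if x < v)
--         # successor rank in the cyclic lexicographic order, then unrank it
--         r = (rank + 1) % _fact(n)
--         available = list(range(1, n + 1))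
--         new = []
--         while available:
--             f = _fact(len(available) - 1)
--             new.append(available.pop(r // f))
--             r %= f
--         for key, v in zip(list(character_order), new):
--             character_order[key] = v
--     return character_order
-- ===== Notes on version B (the rewrite author's own statement) =====
-- stated objective: alternative
-- what changed: Replaces the 8-branch comparison cascade by combinatorics: B checks that the values are a permutation of 1..n (n=2 or 3), computes its lexicographic rank via the Lehmer code, adds 1 modulo n!, and unranks back through the factorial number system; no per-permutation branch or table exists in B.
import Mathlib
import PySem

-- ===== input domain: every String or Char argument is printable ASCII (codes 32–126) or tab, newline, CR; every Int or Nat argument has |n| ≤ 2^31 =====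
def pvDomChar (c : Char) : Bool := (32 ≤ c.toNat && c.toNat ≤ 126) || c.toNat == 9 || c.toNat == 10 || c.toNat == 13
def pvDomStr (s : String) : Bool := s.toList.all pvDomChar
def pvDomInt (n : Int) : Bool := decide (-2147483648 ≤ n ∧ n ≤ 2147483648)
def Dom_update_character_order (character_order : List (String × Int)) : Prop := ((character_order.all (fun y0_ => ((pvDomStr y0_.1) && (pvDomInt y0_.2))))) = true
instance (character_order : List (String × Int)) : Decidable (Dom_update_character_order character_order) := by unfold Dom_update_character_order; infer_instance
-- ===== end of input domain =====

-- ===== PORT A =====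
-- B replaces A's 8-branch comparison cascade by Lehmer-code rank/unrank arithmetic (objective: alternative).
-- A mutates its dict argument in place and returns it; the equivalence proved here is about the return value.

-- for key in character_order: character_order[key] = l[i]; i += 1
-- (assigns l's elements to the dict's keys in iteration order; in A every branch runs it
-- with l the same length as the dict, so the positional recursion is exact)
def pvAssignA (co : List (String × Int)) (l : List Int) : List (String × Int) :=
  match co, l with
  | (k, _) :: rest, v :: vs => (k, v) :: pvAssignA rest vs
  | co, _ => co

def update_character_order (character_order : List (String × Int)) : List (String × Int) :=
  let current_values := character_order.map Prod.snd
  let co1 :=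
    if current_values = [1, 2, 3] then pvAssignA character_order [1, 3, 2]
    else if current_values = [1, 3, 2] then pvAssignA character_order [2, 1, 3]
    else if current_values = [2, 1, 3] then pvAssignA character_order [2, 3, 1]
    else if current_values = [2, 3, 1] then pvAssignA character_order [3, 1, 2]
    else if current_values = [3, 1, 2] then pvAssignA character_order [3, 2, 1]
    else if current_values = [3, 2, 1] then pvAssignA character_order [1, 2, 3]
    else character_order
  if current_values = [1, 2] then pvAssignA co1 [2, 1]
  else if current_values = [2, 1] then pvAssignA co1 [1, 2]
  else co1

-- ===== PORT B =====
-- def _fact(n): return 1 if n == 0 else n * _fact(n - 1)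
def pvFact : Nat → Nat
  | 0 => 1
  | n + 1 => (n + 1) * pvFact n

-- while rest: v, rest = rest[0], rest[1:]; rank = rank*(len(rest)+1) + sum(1 for x in rest if x < v)
def pvRankLoop : List Int → Nat → Nat
  | [], rank => rank
  | v :: rest, rank =>
      pvRankLoop rest (rank * (rest.length + 1) + rest.countP (fun x => decide (x < v)))

-- while available: f = _fact(len(available)-1); new.append(available.pop(r // f)); r %= f
-- fueled by the initial length: each iteration pops exactly one element (r // f is always in range here)
def pvUnrankLoop : Nat → List Int → Nat → List Int
  | 0, _, _ => []
  | _ + 1, [], _ => []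
  | n + 1, a :: rest, r =>
      let f := pvFact rest.length
      let i := r / f
      ((a :: rest).getD i 0) :: pvUnrankLoop n ((a :: rest).eraseIdx i) (r % f)

def update_character_order_alt (character_order : List (String × Int)) : List (String × Int) :=
  let vals := character_order.map Prod.snd
  let n := vals.length
  if (n = 2 ∨ n = 3) ∧ PySem.List.sorted vals (fun x => x) false = PySem.List.pyRange 1 (n + 1) 1 then
    let rank := pvRankLoop vals 0
    let r := (rank + 1) % pvFact n
    let new := pvUnrankLoop n (PySem.List.pyRange 1 (n + 1) 1) r
    -- for key, v in zip(list(character_order), new): character_order[key] = v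
    ((character_order.zip new).map (fun p => (p.1.1, p.2))) ++ character_order.drop new.length
  else character_order

-- ===== PRECONDITION & SPEC =====
def Spec_update_character_order (character_order : List (String × Int)) (out : List (String × Int)) : Prop := out = update_character_order_alt character_order
instance (character_order : List (String × Int)) (out : List (String × Int)) : Decidable (Spec_update_character_order character_order out) := by unfold Spec_update_character_order; infer_instance

-- ===== CLAIM =====
def Claim_equal_update_character_order : Prop := ∀ (character_order : List (String × Int)), Dom_update_character_order character_order → Spec_update_character_order character_order (update_character_order character_order)

-- ===== LEMMAS AND PROOFS =====
theorem pvAssignA_eq_zip (co : List (String × Int)) (l : List Int) :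
    pvAssignA co l = ((co.zip l).map (fun p => (p.1.1, p.2))) ++ co.drop l.length := by
  induction co generalizing l with
  | nil => cases l <;> simp [pvAssignA]
  | cons hd tl ih =>
      cases l with
      | nil => simp [pvAssignA]
      | cons v vs => simp [pvAssignA, ih]

theorem perm3_cases (vs : List Int) (h : vs.Perm [1, 2, 3]) :
    vs = [1, 2, 3] ∨ vs = [1, 3, 2] ∨ vs = [2, 1, 3] ∨ vs = [2, 3, 1] ∨
    vs = [3, 1, 2] ∨ vs = [3, 2, 1] := by
  have hlen : vs.length = 3 := by simpa using h.length_eq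
  obtain ⟨a, b, c, rfl⟩ : ∃ a b c, vs = [a, b, c] := by
    match vs, hlen with
    | [a, b, c], _ => exact ⟨a, b, c, rfl⟩
  have ha : a ∈ ([1, 2, 3] : List Int) := h.mem_iff.mp (by simp)
  have hb : b ∈ ([1, 2, 3] : List Int) := h.mem_iff.mp (by simp)
  have hc : c ∈ ([1, 2, 3] : List Int) := h.mem_iff.mp (by simp)
  have h1 := h.count_eq 1
  have h2 := h.count_eq 2
  simp only [List.mem_cons, List.not_mem_nil, or_false] at ha hb hc
  rcases ha with rfl | rfl | rfl <;> rcases hb with rfl | rfl | rfl <;>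
    rcases hc with rfl | rfl | rfl <;> simp_all

theorem perm2_cases (vs : List Int) (h : vs.Perm [1, 2]) :
    vs = [1, 2] ∨ vs = [2, 1] := by
  have hlen : vs.length = 2 := by simpa using h.length_eq
  obtain ⟨a, b, rfl⟩ : ∃ a b, vs = [a, b] := by
    match vs, hlen with
    | [a, b], _ => exact ⟨a, b, rfl⟩
  have ha : a ∈ ([1, 2] : List Int) := h.mem_iff.mp (by simp)
  have hb : b ∈ ([1, 2] : List Int) := h.mem_iff.mp (by simp)
  have h1 := h.count_eq 1
  simp only [List.mem_cons, List.not_mem_nil, or_false] at ha hb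
  rcases ha with rfl | rfl <;> rcases hb with rfl | rfl <;> simp_all

theorem pvNew1 : pvUnrankLoop 3 (PySem.List.pyRange 1 4 1) ((pvRankLoop [1, 2, 3] 0 + 1) % pvFact 3) = [1, 3, 2] := by decide
theorem pvS1 : (PySem.List.sorted ([1, 2, 3] : List Int) (fun x => x) false) = PySem.List.pyRange 1 4 1 := by decide
theorem pvNew2 : pvUnrankLoop 3 (PySem.List.pyRange 1 4 1) ((pvRankLoop [1, 3, 2] 0 + 1) % pvFact 3) = [2, 1, 3] := by decide
theorem pvS2 : (PySem.List.sorted ([1, 3, 2] : List Int) (fun x => x) false) = PySem.List.pyRange 1 4 1 := by decide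
theorem pvNew3 : pvUnrankLoop 3 (PySem.List.pyRange 1 4 1) ((pvRankLoop [2, 1, 3] 0 + 1) % pvFact 3) = [2, 3, 1] := by decide
theorem pvS3 : (PySem.List.sorted ([2, 1, 3] : List Int) (fun x => x) false) = PySem.List.pyRange 1 4 1 := by decide
theorem pvNew4 : pvUnrankLoop 3 (PySem.List.pyRange 1 4 1) ((pvRankLoop [2, 3, 1] 0 + 1) % pvFact 3) = [3, 1, 2] := by decide
theorem pvS4 : (PySem.List.sorted ([2, 3, 1] : List Int) (fun x => x) false) = PySem.List.pyRange 1 4 1 := by decide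
theorem pvNew5 : pvUnrankLoop 3 (PySem.List.pyRange 1 4 1) ((pvRankLoop [3, 1, 2] 0 + 1) % pvFact 3) = [3, 2, 1] := by decide
theorem pvS5 : (PySem.List.sorted ([3, 1, 2] : List Int) (fun x => x) false) = PySem.List.pyRange 1 4 1 := by decide
theorem pvNew6 : pvUnrankLoop 3 (PySem.List.pyRange 1 4 1) ((pvRankLoop [3, 2, 1] 0 + 1) % pvFact 3) = [1, 2, 3] := by decide
theorem pvS6 : (PySem.List.sorted ([3, 2, 1] : List Int) (fun x => x) false) = PySem.List.pyRange 1 4 1 := by decide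
theorem pvNew7 : pvUnrankLoop 2 (PySem.List.pyRange 1 3 1) ((pvRankLoop [1, 2] 0 + 1) % pvFact 2) = [2, 1] := by decide
theorem pvS7 : (PySem.List.sorted ([1, 2] : List Int) (fun x => x) false) = PySem.List.pyRange 1 3 1 := by decide
theorem pvNew8 : pvUnrankLoop 2 (PySem.List.pyRange 1 3 1) ((pvRankLoop [2, 1] 0 + 1) % pvFact 2) = [1, 2] := by decide
theorem pvS8 : (PySem.List.sorted ([2, 1] : List Int) (fun x => x) false) = PySem.List.pyRange 1 3 1 := by decide

-- ===== VERDICT =====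
theorem update_character_order_spec : Claim_equal_update_character_order := by
  intro co _
  unfold Spec_update_character_order update_character_order update_character_order_alt
  by_cases h1 : co.map Prod.snd = [1, 2, 3]
  · simp [h1, pvNew1, pvS1, pvAssignA_eq_zip]
  by_cases h2 : co.map Prod.snd = [1, 3, 2]
  · simp [h2, pvNew2, pvS2, pvAssignA_eq_zip]
  by_cases h3 : co.map Prod.snd = [2, 1, 3]
  · simp [h3, pvNew3, pvS3, pvAssignA_eq_zip]
  by_cases h4 : co.map Prod.snd = [2, 3, 1]
  · simp [h4, pvNew4, pvS4, pvAssignA_eq_zip]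
  by_cases h5 : co.map Prod.snd = [3, 1, 2]
  · simp [h5, pvNew5, pvS5, pvAssignA_eq_zip]
  by_cases h6 : co.map Prod.snd = [3, 2, 1]
  · simp [h6, pvNew6, pvS6, pvAssignA_eq_zip]
  by_cases h7 : co.map Prod.snd = [1, 2]
  · simp [h7, pvNew7, pvS7, pvAssignA_eq_zip]
  by_cases h8 : co.map Prod.snd = [2, 1]
  · simp [h8, pvNew8, pvS8, pvAssignA_eq_zip]
  -- none of the eight permutations: both sides leave the list unchanged
  simp [h1, h2, h3, h4, h5, h6, h7, h8]
  intro hn hs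
  exfalso
  have hperm := PySem.List.sorted_perm (xs := co.map Prod.snd)
      (key := fun x : Int => x) (rev := false)
  rcases hn with hn | hn
  · rw [hn] at hs
    have hp : (co.map Prod.snd).Perm [1, 2] := by
      have h' := hperm.symm
      rw [hs] at h'
      simpa [show PySem.List.pyRange 1 3 1 = [1, 2] from by decide] using h'
    rcases perm2_cases _ hp with h | h <;> simp_all
  · rw [hn] at hs
    have hp : (co.map Prod.snd).Perm [1, 2, 3] := by
      have h' := hperm.symm
      rw [hs] at h'
      simpa [show PySem.List.pyRange 1 4 1 = [1, 2, 3] from by decide] using h'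
    rcases perm3_cases _ hp with h | h | h | h | h | h <;> simp_all
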